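-- pv_equiv track=rewrite | github.com/karthikking01/DTII-S2 | calc_sci/main.py | _replace_factorial
-- ===== SOURCE A (Python) =====
-- def _replace_factorial(expression: str) -> str:
-- 	output = ""
-- 	number = ""
-- 	for char in expression:
-- 		if char.isdigit() or char == ".":
-- 			number += char
-- 		elif char == "!":
-- 			if not number:
-- 				raise ValueError("Invalid factorial")
-- 			output += f"factorial({number})"
-- 			number = ""
-- 		else:
-- 			if number:
-- 				output += number
-- 				number = ""
-- 			output += char
-- 	if number:
-- 		output += number
-- 	return output
-- ===== SOURCE B (Python) =====
-- def _replace_factorial(expression: str) -> str: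
--     parts = expression.split("!")
--     output = parts[0]
--     for part in parts[1:]:
--         # the factorial's argument is the trailing digit/dot run of the text built so far
--         i = len(output)
--         while i > 0 and (output[i - 1].isdigit() or output[i - 1] == "."):
--             i -= 1
--         if i == len(output):
--             raise ValueError("Invalid factorial")
--         output = output[:i] + "factorial(" + output[i:] + ")" + part
--     return output
-- ===== Notes on version B (the rewrite author's own statement) =====
-- stated objective: alternative
-- what changed: B drops A's char-by-char scan with its output/number accumulators: it splits the expression on '!' once and, for each separator, wraps the trailing digit/dot run of the text built so far in a factorial(...) call; A's ValueError cases (a '!' not preceded by a digit or dot) raise identically in B and are excluded by Pre_.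
import Mathlib
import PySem

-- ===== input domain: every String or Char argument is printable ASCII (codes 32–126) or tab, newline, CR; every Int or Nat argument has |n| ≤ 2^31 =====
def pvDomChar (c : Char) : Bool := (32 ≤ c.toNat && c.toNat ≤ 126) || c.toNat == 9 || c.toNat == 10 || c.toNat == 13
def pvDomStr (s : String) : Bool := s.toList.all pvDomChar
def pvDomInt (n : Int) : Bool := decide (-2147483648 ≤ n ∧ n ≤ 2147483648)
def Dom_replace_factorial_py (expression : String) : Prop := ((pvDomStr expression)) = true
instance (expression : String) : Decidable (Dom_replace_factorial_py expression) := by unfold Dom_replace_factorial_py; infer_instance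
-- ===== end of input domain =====

-- B replaces A's char-by-char scan with two accumulators by split("!") followed by wrapping
-- the trailing digit/dot run of the text built so far (objective: alternative algorithm).

-- "char.isdigit() or char == '.'" (used by both ports; exact on the ASCII domain)
def isNumCh (c : Char) : Bool := PySem.Chars.isdigit c || c == '.'

-- ===== PORT A =====
-- A's loop state is (output, number); on the '!' branch with number == "" Python raises
-- ValueError (outside Pre_); the port leaves the state unchanged there.
def aStep (st : List Char × List Char) (c : Char) : List Char × List Char :=
  if isNumCh c then (st.1, st.2 ++ [c])
  else if c = '!' then
    if st.2 = [] then st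
    else (st.1 ++ "factorial(".toList ++ st.2 ++ [')'], [])
  else (st.1 ++ st.2 ++ [c], [])

def replace_factorial_py (expression : String) : String :=
  let st := expression.toList.foldl aStep ([], [])
  String.mk (st.1 ++ st.2)

-- ===== PORT B =====
-- Source B's loop body: the backward while loop "while i > 0 and (output[i-1].isdigit() or
-- output[i-1] == '.'): i -= 1" collects exactly the trailing digit/dot run of output, ported
-- here as takeWhile/dropWhile on the reversed list (exact: same run, same split point);
-- "if i == len(output): raise ValueError" is the run-empty case (outside Pre_), where the
-- port just appends the part.
def bStep (output part : List Char) : List Char :=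
  let num := (output.reverse.takeWhile isNumCh).reverse
  let head := (output.reverse.dropWhile isNumCh).reverse
  if num = [] then output ++ part
  else head ++ "factorial(".toList ++ num ++ [')'] ++ part

def replace_factorial_py_alt (expression : String) : String :=
  match PySem.Chars.splitOn expression.toList ['!'] with
  | [] => ""   -- unreachable: split always yields at least one part
  | p0 :: rest => String.mk (rest.foldl bStep p0)

-- ===== PRECONDITION & SPEC =====
-- Pre_ excludes exactly the inputs on which A raises ValueError("Invalid factorial"):
-- those containing a '!' not immediately preceded by a digit or '.' (B raises there too).
def Pre_replace_factorial_py (expression : String) : Prop :=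
  ∀ q ∈ List.zip ('\x00' :: expression.toList) expression.toList,
    q.2 = '!' → isNumCh q.1 = true

instance (expression : String) : Decidable (Pre_replace_factorial_py expression) := by
  unfold Pre_replace_factorial_py; infer_instance

def pvWitness_replace_factorial_py : String := "3!+4.5! x"

def Spec_replace_factorial_py (expression : String) (out : String) : Prop :=
  out = replace_factorial_py_alt expression
instance (expression : String) (out : String) : Decidable (Spec_replace_factorial_py expression out) := by
  unfold Spec_replace_factorial_py; infer_instance

-- ===== CLAIM (what is proved, stated in full; the proofs are below) =====
def Claim_equal_replace_factorial_py : Prop :=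
  ∀ (expression : String), Dom_replace_factorial_py expression →
    Pre_replace_factorial_py expression →
    Spec_replace_factorial_py expression (replace_factorial_py expression)

-- ===== LEMMAS AND PROOFS =====

-- structural description of split on '!': (first part, remaining parts)
def splitRec : List Char → List Char × List (List Char)
  | [] => ([], [])
  | c :: rest =>
    let fr := splitRec rest
    if c = '!' then ([], fr.1 :: fr.2) else (c :: fr.1, fr.2)

theorem splitOn_go_eq : ∀ (fuel : Nat) (l cur : List Char) (acc : List (List Char)),
    l.length ≤ fuel →
    PySem.Chars.splitOn.go ['!'] fuel l cur acc
      = acc.reverse ++ (cur.reverse ++ (splitRec l).1) :: (splitRec l).2 := by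
  intro fuel
  induction fuel with
  | zero =>
    intro l cur acc h
    have : l = [] := List.eq_nil_of_length_eq_zero (Nat.le_zero.mp h)
    subst this
    simp [PySem.Chars.splitOn.go, splitRec]
  | succ n ih =>
    intro l cur acc h
    cases l with
    | nil => simp [PySem.Chars.splitOn.go, splitRec]
    | cons c rest =>
      by_cases hc : c = '!'
      · subst hc
        rw [show PySem.Chars.splitOn.go ['!'] (n+1) ('!' :: rest) cur acc
              = PySem.Chars.splitOn.go ['!'] n (List.drop 1 ('!' :: rest)) [] (cur.reverse :: acc) from by
            simp [PySem.Chars.splitOn.go, List.isPrefixOf]]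
        rw [List.drop_one, List.tail_cons, ih _ _ _ (by simpa using Nat.le_of_succ_le_succ h)]
        simp [splitRec]
      · rw [show PySem.Chars.splitOn.go ['!'] (n+1) (c :: rest) cur acc
              = PySem.Chars.splitOn.go ['!'] n rest (c :: cur) acc from by
            simp [PySem.Chars.splitOn.go, List.isPrefixOf, Ne.symm hc]]
        rw [ih _ _ _ (by simpa using Nat.le_of_succ_le_succ h)]
        simp [splitRec, hc]

theorem splitOn_eq (l : List Char) :
    PySem.Chars.splitOn l ['!'] = (splitRec l).1 :: (splitRec l).2 := by
  unfold PySem.Chars.splitOn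
  rw [splitOn_go_eq _ _ _ _ (by omega)]
  simp

theorem dropWhile_eq_self_of_takeWhile_nil {l : List Char} (h : l.takeWhile isNumCh = []) :
    l.dropWhile isNumCh = l := by
  cases l with
  | nil => rfl
  | cons x xs =>
    rw [List.takeWhile_cons] at h
    by_cases hx : isNumCh x = true
    · simp [hx] at h
    · simp [hx]

theorem bStep_eq (out num part : List Char)
    (hout : out.reverse.takeWhile isNumCh = [])
    (hnum : ∀ c ∈ num, isNumCh c = true) :
    bStep (out ++ num) part =
      if num = [] then out ++ num ++ part
      else out ++ "factorial(".toList ++ num ++ [')'] ++ part := by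
  have h1 : num.reverse.takeWhile isNumCh = num.reverse :=
    List.takeWhile_eq_self_iff.mpr (by intro a ha; exact hnum a (List.mem_reverse.mp ha))
  have h2 : num.reverse.dropWhile isNumCh = [] := by
    have := List.takeWhile_append_dropWhile (p := isNumCh) (l := num.reverse)
    rw [h1] at this
    simpa using this
  have htake : (out ++ num).reverse.takeWhile isNumCh = num.reverse := by
    rw [List.reverse_append, List.takeWhile_append, if_pos (by rw [h1]), hout]
    simp
  have hdrop : (out ++ num).reverse.dropWhile isNumCh = out.reverse := by
    rw [List.reverse_append, List.dropWhile_append, if_pos (by simp [h2])]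
    exact dropWhile_eq_self_of_takeWhile_nil hout
  unfold bStep
  rw [htake, hdrop]
  simp only [List.reverse_reverse]

theorem main_lemma :
    ∀ (l out num : List Char),
      out.reverse.takeWhile isNumCh = [] →
      (∀ c ∈ num, isNumCh c = true) →
      (l.head? = some '!' → num ≠ []) →
      (∀ q ∈ List.zip l l.tail, q.2 = '!' → isNumCh q.1 = true) →
      (l.foldl aStep (out, num)).1 ++ (l.foldl aStep (out, num)).2
        = (splitRec l).2.foldl bStep (out ++ num ++ (splitRec l).1) := by
  intro l
  induction l with
  | nil => intro out num _ _ _ _; simp [splitRec]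
  | cons c rest ih =>
    intro out num hout hnum hhd hzip
    have hzip1 : rest.head? = some '!' → isNumCh c = true := by
      cases rest with
      | nil => intro hd; simp at hd
      | cons e es =>
        intro hd
        simp only [List.head?_cons, Option.some.injEq] at hd
        exact hzip (c, e) (by simp [List.zip_cons_cons]) hd
    have hziprest : ∀ q ∈ List.zip rest rest.tail, q.2 = '!' → isNumCh q.1 = true := by
      intro q hq
      apply hzip q
      cases rest with
      | nil => simp at hq
      | cons e es => simp [List.zip_cons_cons]; right; simpa using hq
    by_cases hc1 : isNumCh c = true
    · have hcne : c ≠ '!' := by intro h; rw [h] at hc1; exact absurd hc1 (by decide)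
      have hsp : splitRec (c :: rest) = (c :: (splitRec rest).1, (splitRec rest).2) := by
        simp [splitRec, hcne]
      rw [hsp]
      have hA : List.foldl aStep (out, num) (c :: rest)
          = List.foldl aStep (out, num ++ [c]) rest := by
        simp [aStep, hc1]
      rw [hA, ih out (num ++ [c]) hout
        (by intro a ha; rcases List.mem_append.mp ha with h | h
            · exact hnum a h
            · simp at h; subst h; exact hc1)
        (by intro _; simp)
        hziprest]
      simp
    · by_cases hc2 : c = '!'
      · subst hc2
        have hne : num ≠ [] := hhd rfl
        have hA : List.foldl aStep (out, num) ('!' :: rest)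
            = List.foldl aStep (out ++ "factorial(".toList ++ num ++ [')'], []) rest := by
          simp [aStep, hne, isNumCh, PySem.Chars.isdigit]
        have hsp : splitRec ('!' :: rest) = ([], (splitRec rest).1 :: (splitRec rest).2) := by
          simp [splitRec]
        rw [hA, hsp]
        have hout' : (out ++ "factorial(".toList ++ num ++ [')']).reverse.takeWhile isNumCh = [] := by
          simp [List.takeWhile_cons]
          decide
        rw [ih _ [] hout' (by intro a ha; simp at ha)
          (by intro hh
              exfalso
              have := hzip1 hh
              exact absurd this (by decide))
          hziprest]
        simp only [List.foldl_cons, List.append_nil]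
        rw [bStep_eq out num _ hout hnum, if_neg hne]
      · have hsp : splitRec (c :: rest) = (c :: (splitRec rest).1, (splitRec rest).2) := by
          simp [splitRec, hc2]
        have hA : List.foldl aStep (out, num) (c :: rest)
            = List.foldl aStep (out ++ num ++ [c], []) rest := by
          simp [aStep, hc1, hc2]
        rw [hA, hsp]
        have hout' : (out ++ num ++ [c]).reverse.takeWhile isNumCh = [] := by
          simp [hc1]
        rw [ih _ [] hout' (by intro a ha; simp at ha)
          (by intro hh
              exfalso
              exact hc1 (hzip1 hh))
          hziprest]
        simp

-- ===== VERDICT (by name: the statement is the Claim_ definition above) =====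
theorem replace_factorial_py_spec : Claim_equal_replace_factorial_py := by
  unfold Claim_equal_replace_factorial_py
  intro e _ hpre
  unfold Spec_replace_factorial_py replace_factorial_py replace_factorial_py_alt
  unfold Pre_replace_factorial_py at hpre
  rw [splitOn_eq]
  have hhd : e.toList.head? = some '!' → ([] : List Char) ≠ [] := by
    intro hh
    exfalso
    cases hl : e.toList with
    | nil => rw [hl] at hh; simp at hh
    | cons x xs =>
      rw [hl] at hh
      simp only [List.head?_cons, Option.some.injEq] at hh
      have h0 := hpre ('\x00', x) (by rw [hl]; simp [List.zip_cons_cons]) hh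
      exact absurd (by simpa using h0 : isNumCh '\x00' = true) (by decide)
  have hzip : ∀ q ∈ List.zip e.toList e.toList.tail, q.2 = '!' → isNumCh q.1 = true := by
    intro q hq
    apply hpre q
    cases hl : e.toList with
    | nil => rw [hl] at hq; simp at hq
    | cons x xs =>
      rw [hl] at hq
      simp only [List.tail_cons] at hq
      simp only [List.zip_cons_cons, List.mem_cons]
      right; exact hq
  have h := main_lemma e.toList [] [] (by simp) (by intro a ha; simp at ha) hhd hzip
  simp only [List.nil_append] at h
  show String.mk ((e.toList.foldl aStep ([], [])).1 ++ (e.toList.foldl aStep ([], [])).2)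
      = String.mk ((splitRec e.toList).2.foldl bStep (splitRec e.toList).1)
  rw [h]
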